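-- pv_equiv track=rewrite | github.com/HyunjunJeon/problem_solving_python | inflearn_python_algorithm/ch2/2-10.py | solve
-- ===== SOURCE A (Python) =====
-- def solve(datas):
--     sum = 0
--     check = 0
--     for data in datas:
--         if data == 1:
--             check += 1
--             sum += check
--         elif data == 0:
--             check = 0
--     return sum
-- ===== SOURCE B (Python) =====
-- def solve(datas):
--     # Recursive segment decomposition: count the 1s in the prefix up to the
--     # first 0, add that run's triangular number, then recurse on the remainder.
--     k = 0
--     ones = 0
--     n = len(datas)
--     while k < n and datas[k] != 0:
--         if datas[k] == 1:
--             ones += 1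
--         k += 1
--     t = ones * (ones + 1) // 2
--     if k == n:
--         return t
--     return t + solve(datas[k + 1:])
-- ===== Notes on version B (the rewrite author's own statement) =====
-- stated objective: alternative
-- what changed: B is a recursive segment decomposition: it counts the 1s up to the first 0, adds that run's triangular-number contribution ones*(ones+1)//2 in closed form, and recurses on the remainder of the list, instead of A's single fold that adds a running counter at every 1.
import Mathlib
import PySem

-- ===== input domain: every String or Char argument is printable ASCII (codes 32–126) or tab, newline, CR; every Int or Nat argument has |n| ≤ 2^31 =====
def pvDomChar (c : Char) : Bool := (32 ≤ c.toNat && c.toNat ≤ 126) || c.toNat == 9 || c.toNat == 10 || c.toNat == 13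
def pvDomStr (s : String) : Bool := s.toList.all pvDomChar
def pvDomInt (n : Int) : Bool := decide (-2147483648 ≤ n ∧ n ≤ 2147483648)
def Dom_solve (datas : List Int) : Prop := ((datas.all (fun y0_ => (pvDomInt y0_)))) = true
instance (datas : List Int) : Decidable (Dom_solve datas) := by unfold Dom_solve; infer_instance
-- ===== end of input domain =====

-- B replaces A's single fold with a recursive segment decomposition: count the 1s up to the
-- first 0, add that run's triangular number in closed form, recurse on the rest; same O(n) cost.

-- ===== PORT A =====
def solve (datas : List Int) : Int :=
  (datas.foldl
    (fun (s : Int × Int) data =>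
      if data = 1 then (s.1 + (s.2 + 1), s.2 + 1)
      else if data = 0 then (s.1, 0)
      else s)
    (0, 0)).1

-- ===== PORT B =====
-- B's leading while-loop: walk until the first 0 (or the end), counting elements equal to 1;
-- returns the count and, if a 0 was hit, the suffix after it.
def scanRun : List Int → Int → Int × Option (List Int)
  | [], ones => (ones, none)
  | d :: t, ones =>
      if d = 0 then (ones, some t)
      else scanRun t (if d = 1 then ones + 1 else ones)

-- termination lemma for solve_alt's recursion on the suffix returned by scanRun
theorem scanRun_rest_lt : ∀ (l : List Int) (c o : Int) (r : List Int),
    scanRun l c = (o, some r) → r.length < l.length := by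
  intro l
  induction l with
  | nil => intro c o r h; simp [scanRun] at h
  | cons d t ih =>
    intro c o r h
    simp only [scanRun] at h
    by_cases hd : d = 0
    · rw [if_pos hd] at h
      cases h
      simp
    · rw [if_neg hd] at h
      exact Nat.lt_trans (ih _ _ _ h) (by simp)

def solve_alt (datas : List Int) : Int :=
  match h : scanRun datas 0 with
  | (ones, none) => PySem.Int.floordiv (ones * (ones + 1)) 2
  | (ones, some rest) => PySem.Int.floordiv (ones * (ones + 1)) 2 + solve_alt rest
termination_by datas.length
decreasing_by exact scanRun_rest_lt _ _ _ _ h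

-- ===== PRECONDITION & SPEC =====
def Spec_solve (datas : List Int) (out : Int) : Prop := out = solve_alt datas
instance (datas : List Int) (out : Int) : Decidable (Spec_solve datas out) := by unfold Spec_solve; infer_instance

-- ===== CLAIM (what is proved, stated in full; the proofs are below) =====
def Claim_equal_solve : Prop := ∀ (datas : List Int), Dom_solve datas → Spec_solve datas (solve datas)

-- ===== LEMMAS AND PROOFS =====

def tri (c : Int) : Int := PySem.Int.floordiv (c * (c + 1)) 2

theorem tri_succ (c : Int) : tri (c + 1) = tri c + (c + 1) := by
  have h : (c + 1) * (c + 1 + 1) = c * (c + 1) + (c + 1) * 2 := by ring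
  simp only [tri, h]
  rw [PySem.Int.floordiv_eq_ediv_of_pos (by norm_num : (0:Int) < 2),
      PySem.Int.floordiv_eq_ediv_of_pos (by norm_num : (0:Int) < 2)]
  omega

theorem solve_alt_eq (l : List Int) :
    solve_alt l =
      (match scanRun l 0 with
       | (ones, none) => tri ones
       | (ones, some rest) => tri ones + solve_alt rest) := by
  rw [solve_alt]
  rcases h : scanRun l 0 with ⟨o, _ | r⟩ <;> simp [tri]

theorem tri_zero : tri 0 = 0 := by decide

theorem solve_loop (l : List Int) (s c : Int) :
    (l.foldl
      (fun (s : Int × Int) data =>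
        if data = 1 then (s.1 + (s.2 + 1), s.2 + 1)
        else if data = 0 then (s.1, 0)
        else s)
      (s, c)).1
    =
    s + (tri (scanRun l c).1 - tri c) +
      (match (scanRun l c).2 with
       | none => 0
       | some rest => solve_alt rest) := by
  induction l generalizing s c with
  | nil => simp [scanRun]
  | cons d t ih =>
    simp only [List.foldl_cons, scanRun]
    by_cases h1 : d = 1
    · subst h1
      simp only [if_pos rfl, one_ne_zero, if_neg, ite_false, reduceIte]
      rw [ih]
      rw [tri_succ]
      ring_nf
    · by_cases h0 : d = 0
      · subst h0
        simp only [if_neg h1, if_pos rfl, zero_ne_one, ite_false, ite_true, reduceIte]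
        rw [ih]
        rw [solve_alt_eq t]
        rcases h : scanRun t 0 with ⟨o, _ | r⟩ <;> simp [h, tri_zero] <;> ring
      · simp only [if_neg h1, if_neg h0]
        rw [ih]

-- ===== VERDICT (by name: the statement is the Claim_ definition above) =====
theorem solve_spec : Claim_equal_solve := by
  intro datas _
  show solve datas = solve_alt datas
  rw [solve, solve_loop, solve_alt_eq]
  rcases h : scanRun datas 0 with ⟨o, _ | r⟩ <;> simp [h, tri_zero] <;> ring
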